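-- pv_equiv track=rewrite | github.com/pokerdio/generic | euler/euler-760.py | bar
-- ===== SOURCE A (Python) =====
-- def bar(N, two):
--     two = 2 ** two
--     ret = []
--     for n in range(N + 1):
--         s = 0
--         for k in range(n + 1):
--             s += (k | (n - k)) & two > 0
--         ret.append(s)
--     return ret
-- ===== SOURCE B (Python) =====
-- def bar(N, two):
--     # Closed form per n: answer = (n+1) - #{k in [0,n] : bit `two` clear in both k and n-k}.
--     # k and n-k both have bit t clear iff k % 2h < h and (n-k) % 2h < h (h = 2^t); counting
--     # those k gives (n // 2h + 1) * c where c depends only on n % 2h.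
--     h = 2 ** two
--     P = 2 * h
--     ret = []
--     for n in range(N + 1):
--         q, nr = divmod(n, P)
--         c = nr + 1 if nr < h else max(0, 2 * h - 1 - nr)
--         ret.append(n + 1 - (q + 1) * c)
--     return ret
-- ===== Notes on version B (the rewrite author's own statement) =====
-- stated objective: faster
-- what changed: Replaces the O(n) inner loop over k by an O(1) closed form per n: the count of k with bit `two` set in k|(n-k) equals (n+1) minus (n//2h+1)*c(n%2h), derived from the periodicity of the both-bits-clear condition modulo 2^(two+1).
import Mathlib
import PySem

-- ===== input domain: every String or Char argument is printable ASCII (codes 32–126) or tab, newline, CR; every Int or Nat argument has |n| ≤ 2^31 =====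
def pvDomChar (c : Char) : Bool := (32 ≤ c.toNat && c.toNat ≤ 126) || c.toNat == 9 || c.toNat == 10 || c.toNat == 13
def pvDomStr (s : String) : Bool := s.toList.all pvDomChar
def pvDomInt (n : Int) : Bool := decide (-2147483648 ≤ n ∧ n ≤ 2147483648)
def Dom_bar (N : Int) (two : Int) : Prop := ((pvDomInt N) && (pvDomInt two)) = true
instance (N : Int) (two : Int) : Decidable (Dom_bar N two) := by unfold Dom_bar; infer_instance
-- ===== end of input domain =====

-- B replaces A's O(n) inner loop over k by an O(1) closed form per n (asymptotically faster).

-- ===== PORT A =====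
-- `two = 2 ** two` is ported as `2 ^ two.toNat`, exact under Pre_bar (0 ≤ two);
-- for two < 0 Python's 2**two is a float and `&` raises TypeError.
def bar (N : Int) (two : Int) : List Int :=
  let tw : Int := 2 ^ two.toNat
  (PySem.List.pyRange 0 (N + 1) 1).foldl
    (fun ret n =>
      ret ++ [(PySem.List.pyRange 0 (n + 1) 1).foldl
        (fun s k => s + (if PySem.Int.band (PySem.Int.bor k (n - k)) tw > 0 then 1 else 0)) 0])
    []

-- ===== PORT B =====
-- port of Source B's helper `count(n)`
def barAltCount (h : Int) (P : Int) (n : Int) : Int :=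
  let q := PySem.Int.floordiv n P
  let nr := PySem.Int.mod n P
  let c := if nr < h then nr + 1 else max 0 (2 * h - 1 - nr)
  n + 1 - (q + 1) * c

def bar_alt (N : Int) (two : Int) : List Int :=
  let h : Int := 2 ^ two.toNat
  (PySem.List.pyRange 0 (N + 1) 1).map (barAltCount h (2 * h))

-- ===== PRECONDITION & SPEC =====
-- Pre_ excludes two < 0 with N ≥ 0, exactly where Python A raises TypeError
-- (2**two is a float and `int & float` fails in the first loop iteration; for N < 0 the loop is empty and A returns []).
def Pre_bar (N : Int) (two : Int) : Prop := 0 ≤ two ∨ N < 0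
instance (N : Int) (two : Int) : Decidable (Pre_bar N two) := by unfold Pre_bar; infer_instance
def pvWitness_bar : Int × Int := (6, 1)

def Spec_bar (N : Int) (two : Int) (out : List Int) : Prop := out = bar_alt N two
instance (N : Int) (two : Int) (out : List Int) : Decidable (Spec_bar N two out) := by unfold Spec_bar; infer_instance

-- ===== CLAIM (what is proved, stated in full; the proofs are below) =====
def Claim_equal_bar : Prop := ∀ (N : Int) (two : Int), Dom_bar N two → Pre_bar N two → Spec_bar N two (bar N two)

-- ===== LEMMAS AND PROOFS =====

-- Nat-side count of k ∈ [0,m] with bit t clear in both k and m-k, phrased via residues mod 2h (h = 2^t)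
def czero (h r : Nat) : Nat := if r < h then r + 1 else 2 * h - 1 - r

def pz (h m j : Nat) : Bool := decide (j % (2 * h) < h ∧ (m - j) % (2 * h) < h)

-- bit t of x is clear iff x mod 2^(t+1) < 2^t
theorem and_two_pow_eq_zero_iff (x t : Nat) : x &&& 2 ^ t = 0 ↔ x % (2 * 2 ^ t) < 2 ^ t := by
  rw [Nat.and_two_pow, show 2 * 2 ^ t = 2 ^ t * 2 by ring, Nat.mod_mul]
  have h1 : x % 2 ^ t < 2 ^ t := Nat.mod_lt x (Nat.two_pow_pos t)
  have h2 : (0 : Nat) < 2 ^ t := Nat.two_pow_pos t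
  rw [Nat.testBit_eq_decide_div_mod_eq]
  have h3 : x / 2 ^ t % 2 = 0 ∨ x / 2 ^ t % 2 = 1 := by omega
  rcases h3 with h3 | h3
  · simp [h3]; omega
  · simp [h3]

theorem or_and_two_pow_eq_zero_iff (a b t : Nat) :
    (a ||| b) &&& 2 ^ t = 0 ↔ (a &&& 2 ^ t = 0 ∧ b &&& 2 ^ t = 0) := by
  have h2 : (0 : Nat) < 2 ^ t := Nat.two_pow_pos t
  simp only [Nat.and_two_pow, Nat.testBit_or]
  rcases ha : a.testBit t <;> rcases hb : b.testBit t <;> simp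

-- counting an interval inside range n
theorem countP_range_interval (lo hi : Nat) :
    ∀ n, (List.range n).countP (fun j => decide (lo ≤ j ∧ j < hi)) = min hi n - lo := by
  intro n
  induction n with
  | zero => simp
  | succ n ih =>
      rw [List.range_succ, List.countP_append, ih]
      by_cases hc : lo ≤ n ∧ n < hi <;> simp [hc] <;> omega

-- a window of P consecutive integers counts like range P for a P-periodic predicate
theorem countP_range'_shift (P : Nat) (p : Nat → Bool) :
    ∀ a, (∀ j < a, p (j + P) = p j) → (List.range' a P).countP p = (List.range P).countP p := by
  intro a
  induction a with
  | zero => intro _; rw [List.range_eq_range']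
  | succ a ih =>
      intro hp
      rcases P with _ | PP
      · simp
      · have e1 : List.range' (a + 1) (PP + 1) = List.range' (a + 1) PP ++ [a + 1 + PP] := by
          rw [List.range'_concat, one_mul]
        have e2 : List.range' a (PP + 1) = a :: List.range' (a + 1) PP := by
          rw [List.range'_succ]
        have hpa : p (a + 1 + PP) = p a := by
          have := hp a (by omega)
          rw [show a + 1 + PP = a + (PP + 1) by omega, this]
        rw [e1, List.countP_append, ← ih (fun j hj => hp j (by omega)), e2]
        simp [List.countP_cons, hpa]

theorem mod_sub_period (p x : Nat) (h : p ≤ x) : (x - p) % p = x % p := by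
  conv_rhs => rw [← Nat.sub_add_cancel h, Nat.add_mod_right]

theorem div_sub_period (p x : Nat) (hp : 0 < p) (h : p ≤ x) : (x - p) / p + 1 = x / p := by
  conv_rhs => rw [← Nat.sub_add_cancel h, Nat.add_div_right _ hp]

theorem count_residues (h m : Nat) (hh : 0 < h) (hm : 2 * h ≤ m) :
    (List.range (2 * h)).countP (pz h m) = czero h (m % (2 * h)) := by
  have hP : 0 < 2 * h := by omega
  have hdm : 2 * h * (m / (2 * h)) + m % (2 * h) = m := Nat.div_add_mod m (2 * h)
  have hq : 1 ≤ m / (2 * h) := (Nat.one_le_div_iff hP).mpr hm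
  have hnr : m % (2 * h) < 2 * h := Nat.mod_lt m hP
  have hmod : ∀ j < 2 * h, (m - j) % (2 * h) =
      if j ≤ m % (2 * h) then m % (2 * h) - j else 2 * h + m % (2 * h) - j := by
    intro j hj
    by_cases hc : j ≤ m % (2 * h)
    · rw [if_pos hc, show m - j = (m % (2 * h) - j) + (2 * h) * (m / (2 * h)) by omega,
        Nat.add_mul_mod_self_left, Nat.mod_eq_of_lt (by omega)]
    · obtain ⟨q', hq'⟩ : ∃ q', m / (2 * h) = q' + 1 := ⟨m / (2 * h) - 1, by omega⟩
      rw [hq', Nat.mul_add, Nat.mul_one] at hdm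
      rw [if_neg hc, show m - j = (2 * h + m % (2 * h) - j) + (2 * h) * q' by omega,
        Nat.add_mul_mod_self_left, Nat.mod_eq_of_lt (by omega)]
  by_cases hcase : m % (2 * h) < h
  · have : (List.range (2 * h)).countP (pz h m)
        = (List.range (2 * h)).countP (fun j => decide (0 ≤ j ∧ j < m % (2 * h) + 1)) := by
      refine List.countP_congr ?_
      intro j hj
      have hj' : j < 2 * h := List.mem_range.mp hj
      simp only [pz, decide_eq_true_eq, Nat.mod_eq_of_lt hj', hmod j hj']
      by_cases hc : j ≤ m % (2 * h) <;> simp [hc] <;> omega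
    rw [this, countP_range_interval, czero, if_pos hcase]
    omega
  · have : (List.range (2 * h)).countP (pz h m)
        = (List.range (2 * h)).countP (fun j => decide (m % (2 * h) + 1 - h ≤ j ∧ j < h)) := by
      refine List.countP_congr ?_
      intro j hj
      have hj' : j < 2 * h := List.mem_range.mp hj
      simp only [pz, decide_eq_true_eq, Nat.mod_eq_of_lt hj', hmod j hj']
      by_cases hc : j ≤ m % (2 * h) <;> simp [hc] <;> omega
    rw [this, countP_range_interval, czero, if_neg hcase]
    omega

theorem Zform (h : Nat) (hh : 0 < h) :
    ∀ m, (List.range (m + 1)).countP (pz h m) = (m / (2 * h) + 1) * czero h (m % (2 * h)) := by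
  intro m
  induction m using Nat.strong_induction_on with
  | _ m ih =>
    by_cases hm : m < 2 * h
    · -- base: a single (partial) period
      rw [Nat.div_eq_of_lt hm, Nat.mod_eq_of_lt hm]
      have : (List.range (m + 1)).countP (pz h m)
          = (List.range (m + 1)).countP (fun j => decide (m + 1 - h ≤ j ∧ j < min (m + 1) h)) := by
        refine List.countP_congr ?_
        intro j hj
        have hj' : j < m + 1 := List.mem_range.mp hj
        simp only [pz, decide_eq_true_eq,
          Nat.mod_eq_of_lt (show j < 2 * h by omega),
          Nat.mod_eq_of_lt (show m - j < 2 * h by omega)]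
        omega
      rw [this, countP_range_interval, czero]
      by_cases hc : m < h <;> simp [hc] <;> omega
    · -- step: peel one full period off the top
      have hP : 2 * h ≤ m := by omega
      have hsplit : List.range (m + 1)
          = List.range' 0 (m - 2 * h + 1) ++ List.range' (m - 2 * h + 1) (2 * h) := by
        rw [List.range_eq_range']
        rw [show List.range' (m - 2 * h + 1) (2 * h) = List.range' (0 + 1 * (m - 2 * h + 1)) (2 * h) by
          norm_num]
        rw [List.range'_append]
        congr 1
        omega
      rw [hsplit, List.countP_append]
      have hfirst : (List.range' 0 (m - 2 * h + 1)).countP (pz h m)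
          = (List.range (m - 2 * h + 1)).countP (pz h (m - 2 * h)) := by
        rw [← List.range_eq_range']
        refine List.countP_congr ?_
        intro j hj
        have hj' : j < m - 2 * h + 1 := List.mem_range.mp hj
        simp only [pz, decide_eq_true_eq]
        rw [show m - j = (m - 2 * h - j) + 2 * h by omega, Nat.add_mod_right]
      have hsecond : (List.range' (m - 2 * h + 1) (2 * h)).countP (pz h m)
          = czero h (m % (2 * h)) := by
        rw [countP_range'_shift (2 * h) (pz h m) (m - 2 * h + 1) ?_, count_residues h m hh hP]
        intro j hj
        simp only [pz]
        rw [Nat.add_mod_right, show m - (j + 2 * h) = (m - j) - 2 * h by omega,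
          mod_sub_period (2 * h) (m - j) (by omega)]
      rw [hfirst, hsecond, ih (m - 2 * h) (by omega),
        mod_sub_period (2 * h) m hP, div_sub_period (2 * h) m (by omega) hP]
      ring

-- the heart: A's inner loop over k equals B's closed form, for n = ↑m
theorem inner_eq (t m : Nat) :
    (PySem.List.pyRange 0 ((m : Int) + 1) 1).foldl
      (fun s k => s + (if PySem.Int.band (PySem.Int.bor k ((m : Int) - k)) ((2 : Int) ^ t) > 0 then 1 else 0)) 0
    = barAltCount ((2 : Int) ^ t) (2 * (2 : Int) ^ t) (m : Int) := by
  have h2 : (0 : Nat) < 2 ^ t := Nat.two_pow_pos t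
  have hcast : (2 : Int) ^ t = ((2 ^ t : Nat) : Int) := by push_cast; ring
  have hPcast : 2 * (2 : Int) ^ t = ((2 * 2 ^ t : Nat) : Int) := by push_cast; ring
  -- left side: the 0/1-sum is a countP over range (m+1)
  rw [show ((m : Int) + 1) = ((m + 1 : Nat) : Int) by push_cast; ring,
    PySem.List.pyRange_zero_natCast, PySem.List.foldl_add, List.map_map]
  have hmapeq : (List.range (m + 1)).map
      ((fun k : Int => if PySem.Int.band (PySem.Int.bor k ((m : Int) - k)) ((2 : Int) ^ t) > 0 then (1 : Int) else 0)
        ∘ (fun k : Nat => (k : Int)))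
      = (List.range (m + 1)).map (fun j => if (!(pz (2 ^ t) m j)) = true then (1 : Int) else 0) := by
    refine List.map_congr_left ?_
    intro j hj
    have hj' : j < m + 1 := List.mem_range.mp hj
    simp only [Function.comp]
    rw [show (m : Int) - (j : Int) = ((m - j : Nat) : Int) by
        rw [Nat.cast_sub (by omega)], hcast,
      PySem.Int.bor_natCast, PySem.Int.band_natCast]
    have hx : ((j ||| (m - j)) &&& 2 ^ t = 0) ↔ (pz (2 ^ t) m j = true) := by
      rw [or_and_two_pow_eq_zero_iff]
      simp only [pz, decide_eq_true_eq]
      rw [and_two_pow_eq_zero_iff, and_two_pow_eq_zero_iff]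
    by_cases hz : (j ||| (m - j)) &&& 2 ^ t = 0
    · rw [if_neg (by simp [hz]), if_neg (by simp [hx.mp hz])]
    · have hb : pz (2 ^ t) m j = false := by
        rcases hb' : pz (2 ^ t) m j
        · rfl
        · exact absurd (hx.mpr hb') hz
      rw [if_pos (by exact_mod_cast Nat.pos_of_ne_zero hz), if_pos (by simp [hb])]
  rw [hmapeq, PySem.List.sum_map_ite_one_zero]
  -- relate the set-bit count to the clear-bit count
  have hlen : (List.range (m + 1)).length
      = (List.range (m + 1)).countP (pz (2 ^ t) m)
        + (List.range (m + 1)).countP (fun a => decide ¬(pz (2 ^ t) m a = true)) :=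
    List.length_eq_countP_add_countP _
  have hnot : (List.range (m + 1)).countP (fun j => !(pz (2 ^ t) m j))
      = (List.range (m + 1)).countP (fun a => decide ¬(pz (2 ^ t) m a = true)) := by
    refine List.countP_congr ?_
    intro x _
    simp
  rw [List.length_range] at hlen
  have hZ := Zform (2 ^ t) h2 m
  -- right side: evaluate the closed form
  simp only [barAltCount]
  rw [hPcast, PySem.Int.floordiv_natCast, PySem.Int.mod_natCast, hcast]
  have hnr : m % (2 * 2 ^ t) < 2 * 2 ^ t := Nat.mod_lt m (by omega)
  have hcz : (if ((m % (2 * 2 ^ t) : Nat) : Int) < ((2 ^ t : Nat) : Int)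
        then ((m % (2 * 2 ^ t) : Nat) : Int) + 1
        else max 0 (((2 * 2 ^ t : Nat) : Int) - 1 - ((m % (2 * 2 ^ t) : Nat) : Int)))
      = ((czero (2 ^ t) (m % (2 * 2 ^ t)) : Nat) : Int) := by
    unfold czero
    by_cases hc : m % (2 * 2 ^ t) < 2 ^ t
    · rw [if_pos (by exact_mod_cast hc), if_pos hc]
      push_cast
      ring
    · rw [if_neg (by exact_mod_cast hc), if_neg hc, max_eq_right (by omega)]
      omega
  rw [hcz]
  have hprod : (((m / (2 * 2 ^ t) : Nat) : Int) + 1) * ((czero (2 ^ t) (m % (2 * 2 ^ t)) : Nat) : Int)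
      = (((m / (2 * 2 ^ t) + 1) * czero (2 ^ t) (m % (2 * 2 ^ t)) : Nat) : Int) := by
    push_cast; ring
  rw [hprod]
  rw [← hnot] at hlen
  omega

theorem bar_spec : Claim_equal_bar := by
  intro N two hdom hpre
  unfold Spec_bar bar bar_alt
  rw [PySem.List.foldl_append_singleton_eq_map]
  rw [List.nil_append]
  refine List.map_congr_left ?_
  intro n hn
  have h0 : 0 ≤ n := (PySem.List.mem_pyRange_one.mp hn).1
  obtain ⟨m, rfl⟩ : ∃ m : Nat, n = (m : Int) := ⟨n.toNat, (Int.toNat_of_nonneg h0).symm⟩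
  exact inner_eq two.toNat m
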